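-- pv_equiv track=rewrite | github.com/wcedmisten/ingredient-phrase-tagger | ingredient_phrase_tagger/training/tokenizer.py | _normalize_us_uk_split
-- ===== SOURCE A (Python) =====
-- def _normalize_us_uk_split(s):
--     american_units = [
--         'cup', 'tablespoon', 'teaspoon', 'pound', 'ounce', 'quart', 'pint'
--     ]
--     for unit in american_units:
--         s = s.replace(unit + '/', unit + ' ')
--         s = s.replace(unit + 's/', unit + 's ')
--     return s
-- ===== SOURCE B (Python) =====
-- def _normalize_us_uk_split(s):
--     units = ('cup', 'tablespoon', 'teaspoon', 'pound', 'ounce', 'quart', 'pint')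
--     out = []
--     prefix = ''
--     for ch in s:
--         if ch == '/' and any(prefix.endswith(u) or prefix.endswith(u + 's')
--                              for u in units):
--             out.append(' ')
--         else:
--             out.append(ch)
--         prefix += ch
--     return ''.join(out)
-- ===== Notes on version B (the rewrite author's own statement) =====
-- stated objective: alternative
-- what changed: Replaces the 14 sequential full-string replace passes by a single left-to-right scan that rewrites each '/' to ' ' exactly when the already-seen prefix ends with one of the seven unit words or its plural.
import Mathlib
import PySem

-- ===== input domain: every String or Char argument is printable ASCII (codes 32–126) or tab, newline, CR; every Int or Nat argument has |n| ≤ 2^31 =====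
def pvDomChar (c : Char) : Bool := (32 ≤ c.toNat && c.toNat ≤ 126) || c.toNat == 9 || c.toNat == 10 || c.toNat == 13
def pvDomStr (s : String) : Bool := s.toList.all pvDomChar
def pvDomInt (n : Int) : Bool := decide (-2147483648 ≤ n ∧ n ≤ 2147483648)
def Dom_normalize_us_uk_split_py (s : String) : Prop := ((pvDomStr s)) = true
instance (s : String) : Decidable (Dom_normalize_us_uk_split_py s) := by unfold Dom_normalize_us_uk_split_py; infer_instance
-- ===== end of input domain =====

-- B replaces A's 14 sequential full-string replace passes by one left-to-right scan
-- that rewrites each '/' to ' ' when the already-seen prefix ends with a unit word or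
-- its plural; objective: alternative (same result, a single pass over the string).


-- ===== PORT A =====
-- body of A's for-loop: the two replaces done for one unit
def pvRepStep (s : String) (unit : String) : String :=
  let s1 := PySem.Str.replace s (unit ++ "/") (unit ++ " ")
  PySem.Str.replace s1 (unit ++ "s/") (unit ++ "s ")

def normalize_us_uk_split_py (s : String) : String :=
  ["cup", "tablespoon", "teaspoon", "pound", "ounce", "quart", "pint"].foldl pvRepStep s

-- ===== PORT B =====
def pvUnitsAlt : List String := ["cup", "tablespoon", "teaspoon", "pound", "ounce", "quart", "pint"]

-- B's single loop: emit ' ' for a '/' whose preceding prefix ends with a unit or its plural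
def pvAltGo (pre : List Char) : List Char → List Char
  | [] => []
  | c :: cs =>
      (if c == '/' && pvUnitsAlt.any (fun u =>
            PySem.Chars.endswith pre u.toList || PySem.Chars.endswith pre (u.toList ++ ['s']))
       then ' ' else c) :: pvAltGo (pre ++ [c]) cs

def normalize_us_uk_split_py_alt (s : String) : String := String.ofList (pvAltGo [] s.toList)

-- ===== PRECONDITION & SPEC =====
def Spec_normalize_us_uk_split_py (s : String) (out : String) : Prop := out = normalize_us_uk_split_py_alt s
instance (s : String) (out : String) : Decidable (Spec_normalize_us_uk_split_py s out) := by unfold Spec_normalize_us_uk_split_py; infer_instance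

-- ===== CLAIM (what is proved, stated in full; the proofs are below) =====
def Claim_equal_normalize_us_uk_split_py : Prop := ∀ (s : String), Dom_normalize_us_uk_split_py s → Spec_normalize_us_uk_split_py s (normalize_us_uk_split_py s)

-- ===== LEMMAS AND PROOFS =====

def pvSub (ps : List (List Char)) (pre : List Char) : List Char → List Char
  | [] => []
  | c :: cs =>
      (if c = '/' ∧ ∃ w ∈ ps, w <:+ pre then ' ' else c) :: pvSub ps (pre ++ [c]) cs

lemma pvSub_nil (pre : List Char) (l : List Char) : pvSub [] pre l = l := by
  induction l generalizing pre with
  | nil => rfl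
  | cons c cs ih => simp [pvSub, ih]

lemma pvSub_append_no_slash (ps : List (List Char)) (v : List Char) (hv : '/' ∉ v)
    (pre t : List Char) : pvSub ps pre (v ++ t) = v ++ pvSub ps (pre ++ v) t := by
  induction v generalizing pre with
  | nil => simp
  | cons a v ih =>
      have ha : a ≠ '/' := by rintro rfl; exact hv (List.mem_cons_self ..)
      have hv' : '/' ∉ v := fun h => hv (List.mem_cons_of_mem _ h)
      simp [pvSub, ha, ih hv', List.append_assoc]

def pvRel (pre pre' : List Char) : Prop :=
  List.Forall₂ (fun a b => b = a ∨ (a = '/' ∧ b = ' ')) pre pre'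

lemma pv_prefix_iff (w : List Char) (h1 : '/' ∉ w) (h2 : ' ' ∉ w) :
    ∀ {p p' : List Char}, pvRel p p' → (w <+: p' ↔ w <+: p) := by
  induction w with
  | nil => simp
  | cons a w ih =>
    intro p p' h
    have ha1 : a ≠ '/' := by rintro rfl; exact h1 (List.mem_cons_self ..)
    have ha2 : a ≠ ' ' := by rintro rfl; exact h2 (List.mem_cons_self ..)
    have h1' : '/' ∉ w := fun h => h1 (List.mem_cons_of_mem _ h)
    have h2' : ' ' ∉ w := fun h => h2 (List.mem_cons_of_mem _ h)
    cases h with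
    | nil => simp
    | @cons x y l₁ l₂ hxy htail =>
      rw [List.cons_prefix_cons, List.cons_prefix_cons]
      rcases hxy with rfl | ⟨rfl, rfl⟩
      · exact and_congr Iff.rfl (ih h1' h2' htail)
      · constructor
        · rintro ⟨rfl, -⟩; exact absurd rfl ha2
        · rintro ⟨rfl, -⟩; exact absurd rfl ha1

lemma pv_suffix_iff (w pre pre' : List Char) (h : pvRel pre pre')
    (h1 : '/' ∉ w) (h2 : ' ' ∉ w) : w <:+ pre' ↔ w <:+ pre := by
  rw [← List.reverse_prefix, ← List.reverse_prefix]
  exact pv_prefix_iff w.reverse (by simpa using h1) (by simpa using h2)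
    (List.forall₂_reverse_iff.mpr h)

lemma pv_comp (w : List Char) (h1 : '/' ∉ w) (h2 : ' ' ∉ w) (ps : List (List Char)) :
    ∀ l pre pre', pvRel pre pre' →
      pvSub [w] pre' (pvSub ps pre l) = pvSub (ps ++ [w]) pre l := by
  intro l
  induction l with
  | nil => intro pre pre' _; rfl
  | cons c cs ih =>
    intro pre pre' h
    have hw : w <:+ pre' ↔ w <:+ pre := pv_suffix_iff w pre pre' h h1 h2
    by_cases hc : c = '/'
    · subst hc
      by_cases hps : ∃ w' ∈ ps, w' <:+ pre
      · have e1 : pvSub ps pre ('/' :: cs) = ' ' :: pvSub ps (pre ++ ['/']) cs := by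
          simp only [pvSub]; rw [if_pos ⟨trivial, hps⟩]
        have e2 : pvSub (ps ++ [w]) pre ('/' :: cs)
            = ' ' :: pvSub (ps ++ [w]) (pre ++ ['/']) cs := by
          simp only [pvSub]
          obtain ⟨w', hw', hs'⟩ := hps
          rw [if_pos ⟨trivial, w', List.mem_append_left _ hw', hs'⟩]
        rw [e1, e2]
        simp only [pvSub]
        rw [if_neg (by simp), ih _ _ (List.rel_append h
              (List.Forall₂.cons (Or.inr ⟨rfl, rfl⟩) List.Forall₂.nil))]
      · have e1 : pvSub ps pre ('/' :: cs) = '/' :: pvSub ps (pre ++ ['/']) cs := by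
          simp only [pvSub]; rw [if_neg (by rintro ⟨-, hx⟩; exact hps hx)]
        rw [e1]
        simp only [pvSub]
        rw [ih _ _ (List.rel_append h
              (List.Forall₂.cons (Or.inl rfl) List.Forall₂.nil))]
        congr 1
        by_cases hwp : w <:+ pre
        · rw [if_pos ⟨trivial, w, List.mem_singleton.mpr rfl, hw.mpr hwp⟩,
              if_pos ⟨trivial, w, List.mem_append_right _ (List.mem_singleton.mpr rfl), hwp⟩]
        · rw [if_neg ?ne1, if_neg ?ne2]
          case ne1 =>
            rintro ⟨-, w', hw', hs'⟩
            rw [List.mem_singleton] at hw'; subst hw'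
            exact hwp (hw.mp hs')
          case ne2 =>
            rintro ⟨-, w', hw', hs'⟩
            rcases List.mem_append.mp hw' with hm | hm
            · exact hps ⟨w', hm, hs'⟩
            · rw [List.mem_singleton] at hm; subst hm; exact hwp hs'
    · have e1 : pvSub ps pre (c :: cs) = c :: pvSub ps (pre ++ [c]) cs := by
        simp only [pvSub]; rw [if_neg (by rintro ⟨h', -⟩; exact hc h')]
      have e2 : pvSub (ps ++ [w]) pre (c :: cs) = c :: pvSub (ps ++ [w]) (pre ++ [c]) cs := by
        simp only [pvSub]; rw [if_neg (by rintro ⟨h', -⟩; exact hc h')]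
      rw [e1, e2]
      simp only [pvSub]
      rw [if_neg (by rintro ⟨h', -⟩; exact hc h'),
          ih _ _ (List.rel_append h (List.Forall₂.cons (Or.inl rfl) List.Forall₂.nil))]

def pvInv (u pre l : List Char) : Prop :=
  ∀ k, k < pre.length → pre.length < k + u.length + 1 → ¬ ((u ++ ['/']) <+: (pre.drop k ++ l))

lemma pv_no_head_match (u pre : List Char) (cs : List Char) (hu : u ≠ [])
    (hinv : pvInv u pre ('/' :: cs)) : ¬ u <:+ pre := by
  intro hsuf
  obtain ⟨x, hx⟩ := hsuf
  have hlen : u.length ≤ pre.length := by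
    rw [← hx]; simp
  have h1 : x.length < pre.length := by
    have : 0 < u.length := List.length_pos_iff.mpr hu
    rw [← hx]; simp; omega
  have h2 : pre.length < x.length + u.length + 1 := by rw [← hx]; simp
  refine hinv x.length h1 h2 ⟨cs, ?_⟩
  have hdrop : pre.drop x.length = u := by rw [← hx]; simp
  rw [hdrop]; simp

lemma pv_go_spec (u : List Char) (hu : u ≠ []) (hs : '/' ∉ u) :
    ∀ fuel l acc pre, l.length ≤ fuel → pvInv u pre l →
      PySem.Chars.replace.go (u ++ ['/']) (u ++ [' ']) fuel l acc
        = acc.reverse ++ pvSub [u] pre l := by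
  intro fuel
  induction fuel with
  | zero =>
    intro l acc pre hlen _
    have : l = [] := List.eq_nil_of_length_eq_zero (Nat.le_zero.mp hlen)
    subst this
    rw [PySem.Chars.replace.go]; simp [pvSub]
  | succ fuel ih =>
    intro l acc pre hlen hinv
    cases l with
    | nil =>
      rw [PySem.Chars.replace.go]; simp [pvSub]; omega
    | cons c t =>
      rw [PySem.Chars.replace.go]
      by_cases m : (u ++ ['/']).isPrefixOf (c :: t) = true
      · rw [if_pos m]
        obtain ⟨rest, hrest⟩ := List.isPrefixOf_iff_prefix.mp m
        have hupos : 0 < u.length := List.length_pos_iff.mpr hu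
        have hdrop : List.drop (u ++ ['/']).length (c :: t) = rest := by
          rw [← hrest, List.drop_left]
        rw [hdrop]
        have hrlen : rest.length ≤ fuel := by
          have := congrArg List.length hrest
          simp at this hlen; omega
        have hinv' : pvInv u (pre ++ (u ++ ['/'])) rest := by
          intro k hk1 hk2 hpref
          have hplen : (pre ++ (u ++ ['/'])).length = pre.length + u.length + 1 := by simp; omega
          by_cases hkp : k < pre.length
          · -- occurrence would start inside old pre and fit in old window
            exact hinv k hkp (by omega) (by
              have : (pre ++ (u ++ ['/'])).drop k ++ rest = pre.drop k ++ (c :: t) := by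
                rw [List.drop_append_of_le_length (by omega), ← hrest]; simp
              rw [this] at hpref; exact hpref)
          · -- occurrence starting inside the replaced chunk: its window would put '/' inside u
            have hkp' : pre.length ≤ k := Nat.le_of_not_lt hkp
            obtain ⟨j, rfl⟩ : ∃ j, k = pre.length + j := ⟨k - pre.length, by omega⟩
            have hj1 : 1 ≤ j := by omega
            have hj2 : j ≤ u.length := by omega
            have hdropk : (pre ++ (u ++ ['/'])).drop (pre.length + j) = (u ++ ['/']).drop j := by
              rw [List.drop_append]; simp
            rw [hdropk] at hpref
            have hi1 : u.length - j < (u ++ ['/']).length := by simp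
            have hpe := List.IsPrefix.getElem hpref (i := u.length - j) (by simp)
            have hleft : (((u ++ ['/']).drop j) ++ rest)[u.length - j]'(by simp; omega)
                = (u ++ ['/'])[j + (u.length - j)]'(by simp; omega) := by
              rw [List.getElem_append_left (by simp; omega)]
              exact List.getElem_drop
            have hslash : (u ++ ['/'])[j + (u.length - j)]'(by simp; omega) = '/' :=
              List.getElem_concat_length (by omega) _
            have hright : (u ++ ['/'])[u.length - j]'hi1 = u[u.length - j]'(by omega) :=
              List.getElem_append_left (by omega)
            have hchain : u[u.length - j]'(by omega) = '/' :=
              hright.symm.trans (hpe.trans (hleft.trans hslash))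
            have : ('/' : Char) ∈ u := by rw [← hchain]; exact List.getElem_mem _
            exact hs this
        rw [ih rest _ _ hrlen hinv']
        have hs' : '/' ∉ u := hs
        have hsplit : (c :: t) = u ++ ('/' :: rest) := by rw [← hrest]; simp
        rw [hsplit, pvSub_append_no_slash _ u hs']
        have hstep : pvSub [u] (pre ++ u) ('/' :: rest)
            = ' ' :: pvSub [u] (pre ++ u ++ ['/']) rest := by
          simp only [pvSub]
          rw [if_pos ⟨trivial, u, List.mem_singleton.mpr rfl, List.suffix_append _ _⟩]
        rw [hstep]
        simp [List.append_assoc]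
      · rw [if_neg m]
        have hinv' : pvInv u (pre ++ [c]) t := by
          intro k hk1 hk2 hpref
          simp at hk1 hk2
          by_cases hkp : k < pre.length
          · exact hinv k hkp (by omega) (by
              have : (pre ++ [c]).drop k ++ t = pre.drop k ++ (c :: t) := by
                rw [List.drop_append_of_le_length (by omega)]; simp
              rw [this] at hpref; exact hpref)
          · have hk : k = pre.length := by omega
            subst hk
            have : (pre ++ [c]).drop pre.length = [c] := by simp
            rw [this] at hpref
            exact m (List.isPrefixOf_iff_prefix.mpr (by simpa using hpref))
        rw [ih t _ _ (by simpa using hlen) hinv']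
        have hhead : ¬ (c = '/' ∧ ∃ w ∈ [u], w <:+ pre) := by
          rintro ⟨hc, w, hw, hsuf⟩
          rw [List.mem_singleton] at hw
          subst hc hw
          exact pv_no_head_match _ pre t hu hinv hsuf
        simp only [pvSub]
        rw [if_neg hhead]
        simp




lemma pv_replace_eq_sub (u : List Char) (hu : u ≠ []) (hs : '/' ∉ u) (l : List Char) :
    PySem.Chars.replace l (u ++ ['/']) (u ++ [' ']) = pvSub [u] [] l := by
  rw [PySem.Chars.replace]
  rw [if_neg (by simp [List.isEmpty_iff])]
  have := pv_go_spec u hu hs l.length l [] [] le_rfl (by intro k hk; simp at hk)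
  simpa using this

def pvStems : List String → List (List Char)
  | [] => []
  | u :: us => u.toList :: (u.toList ++ ['s']) :: pvStems us

lemma pv_step (P : List (List Char)) (t : List Char) (u : String)
    (h1 : u.toList ≠ []) (h2 : '/' ∉ u.toList) (h3 : ' ' ∉ u.toList) :
    pvRepStep (String.ofList (pvSub P [] t)) u
      = String.ofList (pvSub (P ++ [u.toList, u.toList ++ ['s']]) [] t) := by
  apply String.toList_inj.mp
  rw [pvRepStep]
  have hs2 : '/' ∉ u.toList ++ ['s'] := by simp [h2]
  have hsp2 : ' ' ∉ u.toList ++ ['s'] := by simp [h3]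
  rw [PySem.Str.toList_replace, PySem.Str.toList_replace]
  simp only [String.toList_append, String.toList_ofList]
  have e1 : ("/" : String).toList = ['/'] := rfl
  have e2 : (" " : String).toList = [' '] := rfl
  have e3 : ("s/" : String).toList = ['s', '/'] := rfl
  have e4 : ("s " : String).toList = ['s', ' '] := rfl
  rw [e1, e2, e3, e4]
  rw [pv_replace_eq_sub u.toList h1 h2,
     pv_comp u.toList h2 h3 P t [] [] List.Forall₂.nil]
  have e5 : u.toList ++ ['s', '/'] = (u.toList ++ ['s']) ++ ['/'] := by simp
  have e6 : u.toList ++ ['s', ' '] = (u.toList ++ ['s']) ++ [' '] := by simp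
  rw [e5, e6, pv_replace_eq_sub _ (by simp) hs2,
     pv_comp _ hs2 hsp2 (P ++ [u.toList]) t [] [] List.Forall₂.nil]
  simp

lemma pv_fold (units : List String)
    (h : ∀ u ∈ units, u.toList ≠ [] ∧ '/' ∉ u.toList ∧ ' ' ∉ u.toList) :
    ∀ P t, List.foldl pvRepStep (String.ofList (pvSub P [] t)) units
      = String.ofList (pvSub (P ++ pvStems units) [] t) := by
  induction units with
  | nil => intro P t; simp [pvStems]
  | cons u us ih =>
    intro P t
    obtain ⟨h1, h2, h3⟩ := h u (List.mem_cons_self ..)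
    rw [List.foldl_cons, pv_step P t u h1 h2 h3,
       ih (fun v hv => h v (List.mem_cons_of_mem _ hv)) _ t]
    congr 1
    simp [pvStems, List.append_assoc]

lemma pv_stems_cond (us : List String) (pre : List Char) :
    (∃ w ∈ pvStems us, w <:+ pre) ↔ ∃ u ∈ us, u.toList <:+ pre ∨ u.toList ++ ['s'] <:+ pre := by
  induction us with
  | nil => simp [pvStems]
  | cons u us ih => simp [pvStems, ih, or_assoc]

lemma pv_alt_eq_sub (l : List Char) : ∀ pre,
    pvAltGo pre l = pvSub (pvStems pvUnitsAlt) pre l := by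
  induction l with
  | nil => intro pre; rfl
  | cons c cs ih =>
    intro pre
    simp only [pvAltGo, pvSub, ih]
    congr 1
    have hcond : (c == '/' && pvUnitsAlt.any (fun u =>
          PySem.Chars.endswith pre u.toList || PySem.Chars.endswith pre (u.toList ++ ['s']))) = true
        ↔ (c = '/' ∧ ∃ w ∈ pvStems pvUnitsAlt, w <:+ pre) := by
      rw [pv_stems_cond]
      simp only [Bool.and_eq_true, beq_iff_eq, List.any_eq_true, Bool.or_eq_true,
        PySem.Chars.endswith_iff]
    by_cases hb : (c == '/' && pvUnitsAlt.any (fun u =>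
          PySem.Chars.endswith pre u.toList || PySem.Chars.endswith pre (u.toList ++ ['s']))) = true
    · rw [if_pos hb, if_pos (hcond.mp hb)]
    · rw [if_neg hb, if_neg (fun hp => hb (hcond.mpr hp))]

lemma pv_main (s : String) : normalize_us_uk_split_py s = normalize_us_uk_split_py_alt s := by
  have hinit : s = String.ofList (pvSub [] [] s.toList) := by
    rw [pvSub_nil]; simp
  rw [normalize_us_uk_split_py, normalize_us_uk_split_py_alt, hinit,
     pv_fold _ (by decide) [] s.toList, pv_alt_eq_sub]
  rw [pvSub_nil]
  simp [pvUnitsAlt]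

-- ===== VERDICT (by name: the statement is the Claim_ definition above) =====
theorem normalize_us_uk_split_py_spec : Claim_equal_normalize_us_uk_split_py := by
  intro s _
  exact pv_main s
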